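-- pv_equiv track=rewrite | github.com/dsweet99/dryer | test/benchmark_data/module_021.py | compute_21_13
-- ===== SOURCE A (Python) =====
-- def compute_21_13(a, b, c):
--     x = a * 397 + b * 366
--     y = c * 299 - a * 294
--     for i in range(19):
--         x = x + i * 77
--         y = y - i * 48
--         if x > 7230:
--             x = x % 2115
--     return x + y + 274
-- ===== SOURCE B (Python) =====
-- def compute_21_13(a, b, c):
--     # y is loop-independent: over the 19 steps it drops by 48*sum(range(19)) = 8208,
--     # so it is folded into a closed form; x's path-dependent update is run by a
--     # tail-recursive countdown helper instead of a for-loop over two accumulators.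
--     def step(n, i, x):
--         if n == 0:
--             return x
--         x = x + i * 77
--         if x > 7230:
--             x = x % 2115
--         return step(n - 1, i + 1, x)
--     return step(19, 0, a * 397 + b * 366) + (c * 299 - a * 294 - 8208) + 274
-- ===== Notes on version B (the rewrite author's own statement) =====
-- stated objective: simpler
-- what changed: The loop-independent accumulator y is replaced by the closed form c*299 - a*294 - 8208 (the loop always subtracts 48*171), and the remaining x updates run in a tail-recursive countdown helper instead of a for-loop over a pair of accumulators.
import Mathlib
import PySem

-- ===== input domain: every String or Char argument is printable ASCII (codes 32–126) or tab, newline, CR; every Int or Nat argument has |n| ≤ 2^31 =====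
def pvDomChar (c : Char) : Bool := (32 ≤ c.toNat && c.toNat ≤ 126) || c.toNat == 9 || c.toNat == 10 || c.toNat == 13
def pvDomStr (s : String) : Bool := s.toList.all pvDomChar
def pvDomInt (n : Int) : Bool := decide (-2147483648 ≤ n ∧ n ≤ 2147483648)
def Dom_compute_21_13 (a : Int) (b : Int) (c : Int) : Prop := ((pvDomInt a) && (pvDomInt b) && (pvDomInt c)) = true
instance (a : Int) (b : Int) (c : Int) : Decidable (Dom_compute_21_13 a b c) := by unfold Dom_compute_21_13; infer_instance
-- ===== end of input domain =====

-- B folds the loop-independent accumulator y into the closed form c*299 - a*294 - 8208 and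
-- runs the path-dependent x updates by a tail-recursive countdown helper; objective: simpler.

-- ===== PORT A =====
def compute_21_13 (a : Int) (b : Int) (c : Int) : Int :=
  let x := a * 397 + b * 366
  let y := c * 299 - a * 294
  let p := (PySem.List.pyRange 0 19 1).foldl (fun (p : Int × Int) i =>
    let x := p.1 + i * 77
    let y := p.2 - i * 48
    let x := if x > 7230 then PySem.Int.mod x 2115 else x
    (x, y)) (x, y)
  p.1 + p.2 + 274

-- ===== PORT B =====
-- tail-recursive countdown: n steps remaining, current index i, accumulator x
def computeStep : Nat → Int → Int → Int
  | 0, _, x => x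
  | n + 1, i, x =>
      let x := x + i * 77
      computeStep n (i + 1) (if x > 7230 then PySem.Int.mod x 2115 else x)

def compute_21_13_alt (a : Int) (b : Int) (c : Int) : Int :=
  computeStep 19 0 (a * 397 + b * 366) + (c * 299 - a * 294 - 8208) + 274

-- ===== PRECONDITION & SPEC =====
def Spec_compute_21_13 (a : Int) (b : Int) (c : Int) (out : Int) : Prop := out = compute_21_13_alt a b c
instance (a : Int) (b : Int) (c : Int) (out : Int) : Decidable (Spec_compute_21_13 a b c out) := by unfold Spec_compute_21_13; infer_instance

-- ===== CLAIM (what is proved, stated in full; the proofs are below) =====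
def Claim_equal_compute_21_13 : Prop := ∀ (a : Int) (b : Int) (c : Int), Dom_compute_21_13 a b c → Spec_compute_21_13 a b c (compute_21_13 a b c)

-- ===== LEMMAS AND PROOFS =====

-- A's paired fold over [i, i+1, …, i+n-1] decomposes: the x component is B's countdown
-- recursion, the y component drops 48 * (sum of the n indices) unconditionally.
theorem pair_fold_split (n : Nat) (i x y : Int) :
    (PySem.List.pyRange i (i + n) 1).foldl (fun (p : Int × Int) j =>
      let x := p.1 + j * 77
      let y := p.2 - j * 48
      let x := if x > 7230 then PySem.Int.mod x 2115 else x
      (x, y)) (x, y)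
    = (computeStep n i x, y - 48 * (PySem.List.pyRange i (i + n) 1).sum) := by
  induction n generalizing i x y with
  | zero => simp [PySem.List.pyRange, computeStep]
  | succ m ih =>
    rw [PySem.List.pyRange_one_cons (by omega)]
    simp only [List.foldl_cons, List.sum_cons, computeStep]
    rw [show i + ((m + 1 : Nat) : Int) = (i + 1) + ((m : Nat) : Int) by push_cast; ring, ih]
    exact Prod.ext rfl (by ring)

-- ===== VERDICT (by name: the statement is the Claim_ definition above) =====
theorem compute_21_13_spec : Claim_equal_compute_21_13 := by
  intro a b c _
  unfold Spec_compute_21_13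
  dsimp only [compute_21_13, compute_21_13_alt]
  rw [show (19 : Int) = 0 + ((19 : Nat) : Int) from by norm_num,
    pair_fold_split 19 0 (a * 397 + b * 366) (c * 299 - a * 294)]
  have hs : (PySem.List.pyRange 0 (0 + ((19 : Nat) : Int)) 1).sum = 171 := by decide
  rw [hs]
  ring
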